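-- pv_equiv track=rewrite | github.com/bioinfoUQAM/TOUCAN | src/pipeprediction/RL.py | clearDryIslands
-- ===== SOURCE A (Python) =====
-- def clearDryIslands(geneDecisions, geneWeights, clusterGenes, threshold):
--     sum, pre, pos, count = 0, 0, 0, 0
--     islands = []
--     for i, weight in enumerate(geneWeights):
--         if (weight == 0):
--             sum += weight
--             if (sum == 0):
--                 pos = i
--                 count += 1
--             if (i == len(geneWeights) - 1 and count >= threshold):
--                 pre = pos - (count - 1)
--                 islands.extend(clusterGenes[pre:pos])
--         else:
--             if (count >= threshold):
--                 pre = pos - (count - 1)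
--                 islands.extend(clusterGenes[pre:pos])
--             count = 0
--
--     for id in islands:
--         if(id in geneDecisions[0]):
--             geneDecisions[0].remove(id)
--         if(id not in geneDecisions[1]):
--             if(len(geneDecisions) > 2):
--                 if(id not in geneDecisions[2]):
--                     geneDecisions[1].append(id)
--             else:
--                 geneDecisions[1].append(id)
--
--     geneDecisions[0] = sorted(set(geneDecisions[0]))
--     geneDecisions[1] = sorted(set(geneDecisions[1]))
--
--     return geneDecisions
-- ===== SOURCE B (Python) =====
-- def clearDryIslands(geneDecisions, geneWeights, clusterGenes, threshold):
--     # Phase 1: collect maximal runs of consecutive zero weights as (start, length).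
--     runs = []
--     for i, w in enumerate(geneWeights):
--         if w == 0:
--             if runs and runs[-1][0] + runs[-1][1] == i:
--                 runs[-1][1] += 1
--             else:
--                 runs.append([i, 1])
--     islands = []
--     for start, length in runs:
--         if length >= threshold:
--             islands.extend(clusterGenes[start:start + length - 1])
--     # Phase 2: multiset removal from geneDecisions[0]; set union into geneDecisions[1].
--     removals = {}
--     for g in islands:
--         removals[g] = removals.get(g, 0) + 1
--     counts = {}
--     for v in geneDecisions[0]:
--         counts[v] = counts.get(v, 0) + 1
--     blocked = set(geneDecisions[2]) if len(geneDecisions) > 2 else set()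
--     kept = set(geneDecisions[1])
--     for g in islands:
--         if g not in blocked:
--             kept.add(g)
--     geneDecisions[0] = sorted(v for v, c in counts.items() if c > removals.get(v, 0))
--     geneDecisions[1] = sorted(kept)
--     return geneDecisions
-- ===== Notes on version B (the rewrite author's own statement) =====
-- stated objective: alternative
-- what changed: Replaces A's incremental sum/pre/pos/count state machine with a two-phase group-then-emit pass (collect maximal zero runs, then slice each long-enough run), and replaces the quadratic membership/remove second loop with occurrence-count dictionaries and sets (multiset difference for geneDecisions[0], set union for geneDecisions[1]).
import Mathlib
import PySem

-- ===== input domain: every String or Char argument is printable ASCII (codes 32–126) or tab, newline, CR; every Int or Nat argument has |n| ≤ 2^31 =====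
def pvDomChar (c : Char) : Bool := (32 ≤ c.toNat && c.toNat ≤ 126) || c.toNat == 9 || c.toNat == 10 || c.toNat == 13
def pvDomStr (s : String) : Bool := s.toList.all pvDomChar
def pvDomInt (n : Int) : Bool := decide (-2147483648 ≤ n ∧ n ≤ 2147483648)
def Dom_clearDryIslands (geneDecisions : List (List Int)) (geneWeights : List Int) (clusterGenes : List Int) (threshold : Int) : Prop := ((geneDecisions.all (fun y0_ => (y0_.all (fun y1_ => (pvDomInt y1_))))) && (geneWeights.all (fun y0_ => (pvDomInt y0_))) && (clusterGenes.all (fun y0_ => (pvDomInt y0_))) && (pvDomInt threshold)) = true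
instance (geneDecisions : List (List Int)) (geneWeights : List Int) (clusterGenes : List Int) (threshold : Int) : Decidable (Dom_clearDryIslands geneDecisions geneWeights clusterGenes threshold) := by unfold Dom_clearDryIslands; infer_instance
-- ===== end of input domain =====

-- B replaces A's incremental count/pos state machine by a group-runs-then-emit pass and the
-- membership/remove second loop by occurrence counters and sets; the equivalence proved is about
-- the RETURN value (the Python A also mutates geneDecisions in place; B reassigns the same slots).

-- ===== PORT A =====
-- loop body of A's first for-loop; state = (sum, pre, pos, count, islands), n = len(geneWeights)
def pvStepA (n : Int) (clusterGenes : List Int) (threshold : Int)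
    (st : Int × Int × Int × Int × List Int) (iw : Int × Int) : Int × Int × Int × Int × List Int :=
  let (s, pre, pos, count, islands) := st
  let (i, weight) := iw
  if weight = 0 then
    let s := s + weight
    let (pos, count) := if s = 0 then (i, count + 1) else (pos, count)
    if i = n - 1 ∧ count ≥ threshold then
      (s, pos - (count - 1), pos, count,
        islands ++ PySem.List.slice clusterGenes (some (pos - (count - 1))) (some pos))
    else (s, pre, pos, count, islands)
  else
    if count ≥ threshold then
      (s, pos - (count - 1), pos, 0,
        islands ++ PySem.List.slice clusterGenes (some (pos - (count - 1))) (some pos))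
    else (s, pre, pos, 0, islands)
def pvRunStep (runs : List (Int × Int)) (iw : Int × Int) : List (Int × Int) :=
  if iw.2 = 0 then
    match runs with
    | (s, l) :: rest => if s + l = iw.1 then (s, l + 1) :: rest else (iw.1, 1) :: (s, l) :: rest
    | [] => [(iw.1, 1)]
  else runs
def pvEmit (clusterGenes : List Int) (threshold : Int) (acc : List Int) (r : Int × Int) : List Int :=
  if r.2 ≥ threshold then acc ++ PySem.List.slice clusterGenes (some r.1) (some (r.1 + r.2 - 1)) else acc
def clearDryIslands (geneDecisions : List (List Int)) (geneWeights : List Int) (clusterGenes : List Int) (threshold : Int) : List (List Int) :=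
  let st := (PySem.List.enumerate geneWeights 0).foldl
      (pvStepA (geneWeights.length : Int) clusterGenes threshold) (0, 0, 0, 0, [])
  let islands := st.2.2.2.2
  let d01 := islands.foldl (fun (p : List Int × List Int) id =>
      (if id ∈ p.1 then p.1.erase id else p.1,   -- list.remove, guarded by the membership test
       if id ∉ p.2 then
          (if geneDecisions.length > 2 then
            (if id ∉ PySem.List.pyGetD geneDecisions 2 [] then p.2 ++ [id] else p.2)
          else p.2 ++ [id])
        else p.2))
    (PySem.List.pyGetD geneDecisions 0 [], PySem.List.pyGetD geneDecisions 1 [])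
  PySem.List.sorted (PySem.Set.ofList d01.1) (fun x => x) false
    :: PySem.List.sorted (PySem.Set.ofList d01.2) (fun x => x) false
    :: geneDecisions.drop 2

-- ===== PORT B =====
-- Source B keeps the zero-run list and mutates runs[-1]; here that list is kept reversed
-- (head = last run) and reversed back after the loop.
def clearDryIslands_alt (geneDecisions : List (List Int)) (geneWeights : List Int) (clusterGenes : List Int) (threshold : Int) : List (List Int) :=
  let runs := ((PySem.List.enumerate geneWeights 0).foldl pvRunStep []).reverse
  let islands := runs.foldl (pvEmit clusterGenes threshold) []
  let removals := islands.foldl (fun (d : PySem.Dict Int Int) g => d.insert g (d.getD g 0 + 1)) PySem.Dict.empty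
  let counts := (PySem.List.pyGetD geneDecisions 0 []).foldl (fun (d : PySem.Dict Int Int) v => d.insert v (d.getD v 0 + 1)) PySem.Dict.empty
  let blocked : PySem.Set Int := if geneDecisions.length > 2 then PySem.Set.ofList (PySem.List.pyGetD geneDecisions 2 []) else PySem.Set.empty
  let kept := islands.foldl (fun (s : PySem.Set Int) g => if PySem.Set.contains blocked g then s else PySem.Set.add s g)
      (PySem.Set.ofList (PySem.List.pyGetD geneDecisions 1 []))
  PySem.List.sorted ((counts.items.filter (fun p => p.2 > removals.getD p.1 0)).map Prod.fst) (fun x => x) false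
    :: PySem.List.sorted kept (fun x => x) false
    :: geneDecisions.drop 2

-- ===== PRECONDITION & SPEC =====
-- Pre_ excludes exactly the inputs where the Python A raises IndexError (fewer than two decision lists).
def Pre_clearDryIslands (geneDecisions : List (List Int)) (geneWeights : List Int) (clusterGenes : List Int) (threshold : Int) : Prop :=
  2 ≤ geneDecisions.length
instance (geneDecisions : List (List Int)) (geneWeights : List Int) (clusterGenes : List Int) (threshold : Int) : Decidable (Pre_clearDryIslands geneDecisions geneWeights clusterGenes threshold) := by unfold Pre_clearDryIslands; infer_instance

def pvWitness_clearDryIslands : List (List Int) × List Int × List Int × Int := ([[3, 1], [2]], [0, 0, 1], [7, 8, 9], 2)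

def Spec_clearDryIslands (geneDecisions : List (List Int)) (geneWeights : List Int) (clusterGenes : List Int) (threshold : Int) (out : List (List Int)) : Prop := out = clearDryIslands_alt geneDecisions geneWeights clusterGenes threshold
instance (geneDecisions : List (List Int)) (geneWeights : List Int) (clusterGenes : List Int) (threshold : Int) (out : List (List Int)) : Decidable (Spec_clearDryIslands geneDecisions geneWeights clusterGenes threshold out) := by unfold Spec_clearDryIslands; infer_instance

-- ===== CLAIM (what is proved, stated in full; the proofs are below) =====
def Claim_equal_clearDryIslands : Prop := ∀ (geneDecisions : List (List Int)) (geneWeights : List Int) (clusterGenes : List Int) (threshold : Int), Dom_clearDryIslands geneDecisions geneWeights clusterGenes threshold → Pre_clearDryIslands geneDecisions geneWeights clusterGenes threshold → Spec_clearDryIslands geneDecisions geneWeights clusterGenes threshold (clearDryIslands geneDecisions geneWeights clusterGenes threshold)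

-- ===== LEMMAS AND PROOFS =====

def pvE (cg : List Int) (th : Int) (rs : List (Int × Int)) : List Int := rs.foldl (pvEmit cg th) []
lemma pvE_append (cg : List Int) (th : Int) (rs : List (Int × Int)) (r : Int × Int) :
    pvE cg th (rs ++ [r]) = pvEmit cg th (pvE cg th rs) r := by
  simp [pvE, List.foldl_append]
lemma slice_empty (cg : List Int) (p : Int) (hp : 0 ≤ p) :
    PySem.List.slice cg (some (p + 1)) (some p) = [] := by
  rw [PySem.List.slice_toNat cg (by omega) hp]
  have : p.toNat - (p + 1).toNat = 0 := by omega
  simp [this]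

lemma stepA_zero (n : Int) (cg : List Int) (th pre pos count : Int) (isA : List Int) (i : Int) :
    pvStepA n cg th (0, pre, pos, count, isA) (i, 0) =
      if i = n - 1 ∧ count + 1 ≥ th then
        (0, i - count, i, count + 1, isA ++ PySem.List.slice cg (some (i - count)) (some i))
      else (0, pre, i, count + 1, isA) := by
  simp [pvStepA]

lemma stepA_nonzero (n : Int) (cg : List Int) (th pre pos count : Int) (isA : List Int) (i w : Int)
    (hw : w ≠ 0) :
    pvStepA n cg th (0, pre, pos, count, isA) (i, w) =
      if count ≥ th then
        (0, pos - (count - 1), pos, 0, isA ++ PySem.List.slice cg (some (pos - (count - 1))) (some pos))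
      else (0, pre, pos, 0, isA) := by
  simp [pvStepA, hw]

lemma runStep_zero_nil (i : Int) : pvRunStep [] (i, 0) = [(i, 1)] := by simp [pvRunStep]
lemma runStep_zero_ext (s l : Int) (rest : List (Int × Int)) (i : Int) (h : s + l = i) :
    pvRunStep ((s, l) :: rest) (i, 0) = (s, l + 1) :: rest := by simp [pvRunStep, h]
lemma runStep_zero_new (s l : Int) (rest : List (Int × Int)) (i : Int) (h : ¬ s + l = i) :
    pvRunStep ((s, l) :: rest) (i, 0) = (i, 1) :: (s, l) :: rest := by simp [pvRunStep, h]
lemma runStep_nonzero (rs : List (Int × Int)) (i w : Int) (hw : w ≠ 0) :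
    pvRunStep rs (i, w) = rs := by simp [pvRunStep, hw]

lemma last_emit (cg : List Int) (th i count : Int) (R : List (Int × Int)) :
    (if count + 1 ≥ th then pvE cg th R.reverse ++ PySem.List.slice cg (some (i - count)) (some i)
      else pvE cg th R.reverse)
      = pvE cg th (((i - count, count + 1) :: R).reverse) := by
  rw [show ((i - count, count + 1) :: R).reverse = R.reverse ++ [(i - count, count + 1)] by simp,
      pvE_append]
  simp only [pvEmit]
  by_cases hth : count + 1 ≥ th
  · rw [if_pos hth, if_pos hth, show i - count + (count + 1) - 1 = i by ring]
  · rw [if_neg hth, if_neg hth]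

lemma loop_eq (cg : List Int) (th : Int) :
    ∀ (ws : List Int) (i pre pos count : Int) (isA : List Int) (rsv : List (Int × Int)),
    0 ≤ i → 0 ≤ pos →
    (count = 0 ∧ isA = pvE cg th rsv.reverse ∧ (∀ r ∈ rsv, r.1 + r.2 < i)
      ∨ 1 ≤ count ∧ count ≤ i ∧ pos = i - 1 ∧
        ∃ rest, rsv = (i - count, count) :: rest ∧ isA = pvE cg th rest.reverse ∧ ∀ r ∈ rest, r.1 + r.2 < i - count) →
    (ws = [] → count = 0) →
    ((PySem.List.enumerate ws i).foldl (pvStepA (i + (ws.length : Int)) cg th) (0, pre, pos, count, isA)).2.2.2.2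
      = pvE cg th (((PySem.List.enumerate ws i).foldl pvRunStep rsv).reverse) := by
  intro ws
  induction ws with
  | nil =>
    intro i pre pos count isA rsv hi hpos hinv hnil
    rcases hinv with ⟨-, hisA, -⟩ | ⟨hc, -⟩
    · simpa [PySem.List.enumerate_nil] using hisA
    · exact absurd (hnil rfl) (by omega)
  | cons w rest ih =>
    intro i pre pos count isA rsv hi hpos hinv hnil
    rw [PySem.List.enumerate_cons]
    simp only [List.foldl_cons, List.length_cons]
    have hn : i + (((rest.length + 1 : Nat)) : Int) = (i + 1) + (rest.length : Int) := by push_cast; ring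
    rw [hn]
    by_cases hw : w = 0
    · subst hw
      by_cases hlast : rest = []
      · -- last element of the array, weight zero: both sides finish here
        subst hlast
        simp only [PySem.List.enumerate_nil, List.foldl_nil, List.length_nil]
        rw [stepA_zero]
        have hc : (i : Int) = i + 1 + ((0 : Nat) : Int) - 1 := by push_cast; ring
        rcases hinv with ⟨hc0, hisA, hlt⟩ | ⟨hc1, hci, hpos', ⟨rest', hrsv, hisA, hlt⟩⟩
        · subst hc0
          have hstep : pvRunStep rsv (i, 0) = (i, 1) :: rsv := by
            cases rsv with
            | nil => exact runStep_zero_nil i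
            | cons hd tl =>
              have h1 := hlt hd (by simp)
              rcases hd with ⟨s, l⟩
              exact runStep_zero_new s l tl i (by simp at h1; omega)
          rw [hstep]
          by_cases hth : (0 : Int) + 1 ≥ th
          · rw [if_pos ⟨hc, hth⟩]
            dsimp only
            rw [hisA, show ((i, 1) : Int × Int) = (i - 0, 0 + 1) by norm_num, ← last_emit, if_pos hth]
          · rw [if_neg (fun h => hth h.2)]
            dsimp only
            rw [hisA, show ((i, 1) : Int × Int) = (i - 0, 0 + 1) by norm_num, ← last_emit, if_neg hth]
        · subst hpos'
          rcases hrsv with rfl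
          rw [runStep_zero_ext _ _ _ _ (by ring)]
          by_cases hth : count + 1 ≥ th
          · rw [if_pos ⟨hc, hth⟩]
            dsimp only
            rw [hisA, ← last_emit, if_pos hth]
          · rw [if_neg (fun h => hth h.2)]
            dsimp only
            rw [hisA, ← last_emit, if_neg hth]
      · -- weight zero, more elements follow: invariant is preserved
        have hlast' : ¬ ((i : Int) = (i + 1) + (rest.length : Int) - 1) := by
          cases rest with
          | nil => exact absurd rfl hlast
          | cons a t => simp only [List.length_cons]; push_cast; omega
        rw [stepA_zero, if_neg (fun h => hlast' h.1)]
        rcases hinv with ⟨hc0, hisA, hlt⟩ | ⟨hc1, hci, hpos', ⟨rest', hrsv, hisA, hlt⟩⟩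
        · -- new run starts at i
          have hstep : pvRunStep rsv (i, 0) = (i, 1) :: rsv := by
            cases rsv with
            | nil => exact runStep_zero_nil i
            | cons hd tl =>
              have h1 := hlt hd (by simp)
              rcases hd with ⟨s, l⟩
              exact runStep_zero_new s l tl i (by simp at h1; omega)
          rw [hstep]
          subst hc0
          apply ih (i + 1) pre i 1 isA ((i, 1) :: rsv) (by positivity) hi _ (fun h => absurd h hlast)
          right
          refine ⟨le_refl 1, by omega, by ring, rsv, by norm_num, hisA, ?_⟩
          intro r hr
          have := hlt r hr
          omega
        · -- run continues
          rcases hrsv with rfl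
          rw [runStep_zero_ext _ _ _ _ (by ring)]
          subst hpos'
          apply ih (i + 1) pre i (count + 1) isA _ (by positivity) hi _ (fun h => absurd h hlast)
          right
          refine ⟨by omega, by omega, by ring, rest', ?_, hisA, ?_⟩
          · have h2 : i + 1 - (count + 1) = i - count := by ring
            rw [h2]
          · intro r hr
            have := hlt r hr
            omega
    · -- nonzero weight: current run (if any) is closed
      rw [stepA_nonzero _ _ _ _ _ _ _ _ _ hw, runStep_nonzero _ _ _ hw]
      rcases hinv with ⟨hc0, hisA, hlt⟩ | ⟨hc1, hci, hpos', ⟨rest', hrsv, hisA, hlt⟩⟩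
      · subst hc0
        have hinv' : ∀ r ∈ rsv, r.1 + r.2 < i + 1 := fun r hr => by have := hlt r hr; omega
        by_cases hth : (0 : Int) ≥ th
        · rw [if_pos hth]
          have hsl : PySem.List.slice cg (some (pos - (0 - 1))) (some pos) = [] := by
            rw [show pos - (0 - 1) = pos + 1 by ring]; exact slice_empty cg pos hpos
          rw [hsl, List.append_nil]
          exact ih (i + 1) (pos - (0 - 1)) pos 0 isA rsv (by positivity) hpos
            (Or.inl ⟨rfl, hisA, hinv'⟩) (fun _ => rfl)
        · rw [if_neg hth]
          exact ih (i + 1) pre pos 0 isA rsv (by positivity) hpos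
            (Or.inl ⟨rfl, hisA, hinv'⟩) (fun _ => rfl)
      · subst hpos'
        rcases hrsv with rfl
        have hE : pvE cg th (((i - count, count) :: rest').reverse)
            = if count ≥ th then pvE cg th rest'.reverse ++ PySem.List.slice cg (some (i - count)) (some (i - 1))
              else pvE cg th rest'.reverse := by
          rw [show ((i - count, count) :: rest').reverse = rest'.reverse ++ [(i - count, count)] by simp,
              pvE_append]
          simp only [pvEmit]
          rw [show i - count + count - 1 = i - 1 by ring]
        have hbnd : ∀ r ∈ (i - count, count) :: rest', r.1 + r.2 < i + 1 := by
          intro r hr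
          rcases List.mem_cons.mp hr with rfl | hr
          · show i - count + count < i + 1; omega
          · have := hlt r hr; omega
        by_cases hth : count ≥ th
        · rw [if_pos hth]
          refine ih (i + 1) (i - 1 - (count - 1)) (i - 1) 0 _ _ (by positivity) (by omega)
            (Or.inl ⟨rfl, ?_, hbnd⟩) (fun _ => rfl)
          rw [hE, if_pos hth, hisA, show i - 1 - (count - 1) = i - count by ring]
        · rw [if_neg hth]
          refine ih (i + 1) pre (i - 1) 0 _ _ (by positivity) (by omega)
            (Or.inl ⟨rfl, ?_, hbnd⟩) (fun _ => rfl)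
          rw [hE, if_neg hth, hisA]

lemma d0_count (isl : List Int) : ∀ (d0 : List Int) (v : Int),
    ((isl.foldl (fun d id => if id ∈ d then d.erase id else d) d0).count v) = d0.count v - isl.count v := by
  induction isl with
  | nil => simp
  | cons id rest ih =>
    intro d0 v
    simp only [List.foldl_cons, ih, List.count_cons]
    by_cases hm : id ∈ d0
    · simp only [hm, if_pos, List.count_erase]
      by_cases hv : v = id
      · subst hv; have := List.count_pos_iff.mpr hm; simp; omega
      · simp [Ne.symm hv]
    · simp only [hm, if_false]
      by_cases hv : v = id
      · subst hv; have : d0.count v = 0 := by simpa [List.count_eq_zero] using hm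
        simp [this]
      · simp [Ne.symm hv]

lemma d0_mem (isl d0 : List Int) (v : Int) :
    v ∈ isl.foldl (fun d id => if id ∈ d then d.erase id else d) d0 ↔ isl.count v < d0.count v := by
  rw [← List.count_pos_iff, d0_count]; omega

-- membership after A's append loop on geneDecisions[1]
lemma memA1 (gd : List (List Int)) (x : Int) : ∀ (isl d1 : List Int),
    x ∈ isl.foldl (fun b id => if id ∉ b then
          (if gd.length > 2 then (if id ∉ PySem.List.pyGetD gd 2 [] then b ++ [id] else b) else b ++ [id])
        else b) d1
      ↔ x ∈ d1 ∨ (x ∈ isl ∧ (gd.length > 2 → x ∉ PySem.List.pyGetD gd 2 [])) := by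
  intro isl
  induction isl with
  | nil => simp
  | cons id rest ih =>
    intro d1
    simp only [List.foldl_cons, ih, List.mem_cons]
    have hstep : ∀ y : Int, (y ∈ (if id ∉ d1 then
          (if gd.length > 2 then (if id ∉ PySem.List.pyGetD gd 2 [] then d1 ++ [id] else d1) else d1 ++ [id])
        else d1)) ↔ y ∈ d1 ∨ (y = id ∧ (gd.length > 2 → id ∉ PySem.List.pyGetD gd 2 [])) := by
      intro y
      by_cases h1 : id ∈ d1 <;> by_cases h2 : gd.length > 2 <;>
        by_cases h3 : id ∈ PySem.List.pyGetD gd 2 [] <;>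
        simp [h1, h2, h3] <;> (try (rintro rfl; exact h1)) <;> tauto
    rw [hstep]
    by_cases hx : x = id
    · subst hx; tauto
    · tauto

-- membership and nodup for B's kept-set loop
lemma memB1 (blocked : PySem.Set Int) (x : Int) : ∀ (isl : List Int) (s0 : PySem.Set Int),
    x ∈ isl.foldl (fun s g => if PySem.Set.contains blocked g then s else PySem.Set.add s g) s0
      ↔ x ∈ s0 ∨ (x ∈ isl ∧ x ∉ blocked) := by
  intro isl
  induction isl with
  | nil => simp
  | cons g rest ih =>
    intro s0
    simp only [List.foldl_cons, ih, List.mem_cons]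
    by_cases hb : PySem.Set.contains blocked g
    · have hg : g ∈ blocked := (PySem.Set.contains_iff blocked g).mp hb
      rw [if_pos hb]
      constructor
      · rintro (h | h) <;> tauto
      · rintro (h | ⟨(rfl | hx), hnb⟩) <;> tauto
    · have hg : g ∉ blocked := fun h => hb ((PySem.Set.contains_iff blocked g).mpr h)
      rw [if_neg hb]
      rw [show (x ∈ PySem.Set.add s0 g) = (x ∈ s0 ∨ x = g) from propext (PySem.Set.mem_add s0 g x)]
      by_cases hx : x = g
      · subst hx; tauto
      · tauto

lemma nodupB1 (blocked : PySem.Set Int) : ∀ (isl : List Int) (s0 : PySem.Set Int),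
    List.Nodup s0 →
    List.Nodup (isl.foldl (fun s g => if PySem.Set.contains blocked g then s else PySem.Set.add s g) s0) := by
  intro isl
  induction isl with
  | nil => intro s0 h; simpa using h
  | cons g rest ih =>
    intro s0 h
    simp only [List.foldl_cons]
    apply ih
    by_cases hb : PySem.Set.contains blocked g
    · rwa [if_pos hb]
    · rw [if_neg hb]; exact PySem.Set.nodup_add s0 g h

-- B's filtered counter keys, as a filter over the deduplicated geneDecisions[0]
lemma b0_eq (d0 isl : List Int) :
    (((d0.foldl (fun (d : PySem.Dict Int Int) v => d.insert v (d.getD v 0 + 1)) PySem.Dict.empty).items.filter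
        (fun p => p.2 > (isl.foldl (fun (d : PySem.Dict Int Int) g => d.insert g (d.getD g 0 + 1)) PySem.Dict.empty).getD p.1 0)).map Prod.fst)
      = (PySem.Set.ofList d0).filter (fun k => decide ((isl.count k : Int) < (d0.count k : Int))) := by
  rw [PySem.Dict.foldl_insert_getD_add_one_eq_counter, PySem.Dict.foldl_insert_getD_add_one_eq_counter,
      PySem.Dict.items_counter, List.filter_map, List.map_map]
  have h1 : (Prod.fst ∘ fun k : Int => (k, (d0.count k : Int))) = id := rfl
  rw [h1, List.map_id]
  apply List.filter_congr
  intro k _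
  simp [PySem.Dict.getD_counter]

theorem clearDryIslands_spec : Claim_equal_clearDryIslands := by
  intro gd gw cg th _ _
  unfold Spec_clearDryIslands clearDryIslands clearDryIslands_alt
  dsimp only
  have hisl : ((PySem.List.enumerate gw 0).foldl (pvStepA ((gw.length : Nat) : Int) cg th) (0, 0, 0, 0, [])).2.2.2.2
      = (((PySem.List.enumerate gw 0).foldl pvRunStep []).reverse).foldl (pvEmit cg th) [] := by
    have h := loop_eq cg th gw 0 0 0 0 [] [] le_rfl le_rfl (Or.inl ⟨rfl, rfl, by simp⟩) (fun _ => rfl)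
    simpa [pvE] using h
  rw [hisl]
  set isl := (((PySem.List.enumerate gw 0).foldl pvRunStep []).reverse).foldl (pvEmit cg th) [] with hIsl
  set d0 := PySem.List.pyGetD gd 0 [] with hD0
  set d1 := PySem.List.pyGetD gd 1 [] with hD1
  set d2 := PySem.List.pyGetD gd 2 [] with hD2
  rw [PySem.List.foldl_prod_mk
    (f := fun (a : List Int) (id : Int) => if id ∈ a then a.erase id else a)
    (g := fun (b : List Int) (id : Int) => if id ∉ b then
          (if gd.length > 2 then (if id ∉ d2 then b ++ [id] else b) else b ++ [id])
        else b)
    (l := isl) (a := d0) (b := d1)]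
  congr 1
  · -- geneDecisions[0]
    rw [b0_eq]
    apply PySem.List.sorted_eq_sorted_of_perm _ _ _ (fun a b h => h)
    rw [List.perm_ext_iff_of_nodup (PySem.Set.nodup_ofList _) ((PySem.Set.nodup_ofList d0).filter _)]
    intro a
    rw [PySem.Set.mem_ofList, d0_mem, List.mem_filter, PySem.Set.mem_ofList]
    constructor
    · intro h
      refine ⟨List.count_pos_iff.mp (by omega), by simp; omega⟩
    · rintro ⟨-, h⟩
      simp at h; omega
  congr 1
  · -- geneDecisions[1]
    apply PySem.List.sorted_eq_sorted_of_perm _ _ _ (fun a b h => h)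
    have hblk : ∀ x : Int, (x ∈ (if gd.length > 2 then PySem.Set.ofList d2 else PySem.Set.empty))
        ↔ (gd.length > 2 ∧ x ∈ d2) := by
      intro x
      by_cases h2 : gd.length > 2
      · simp [h2, PySem.Set.mem_ofList]
      · simp [h2, PySem.Set.empty]
    rw [List.perm_ext_iff_of_nodup (PySem.Set.nodup_ofList _)
        (nodupB1 _ isl _ (PySem.Set.nodup_ofList d1))]
    intro a
    rw [PySem.Set.mem_ofList, memA1, memB1, PySem.Set.mem_ofList, hblk]
    tauto
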